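-- pv_equiv track=rewrite | github.com/576961/leo_file | train.py | seq_to_tokens
-- ===== SOURCE A (Python) =====
-- def seq_to_tokens(seq, idx2word):
--     """把索引序列转换为单词列表，遇到 <eos> 停止，忽略 <pad>/<bos>。"""
--     out = []
--     for i in seq:
--         w = idx2word.get(int(i), '<unk>')
--         if w == '<eos>':
--             break
--         if w not in ('<pad>', '<bos>'):
--             out.append(w)
--     return out
-- ===== SOURCE B (Python) =====
-- def seq_to_tokens(seq, idx2word):
--     """Three-stage pipeline: map all indices to words, truncate at the
--     first '<eos>', then filter out '<pad>'/'<bos>'."""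
--     words = [idx2word.get(int(i), '<unk>') for i in seq]
--     if '<eos>' in words:
--         words = words[:words.index('<eos>')]
--     return [w for w in words if w not in ('<pad>', '<bos>')]
-- ===== Notes on version B (the rewrite author's own statement) =====
-- stated objective: alternative
-- what changed: Replaces the single interleaved loop (break on <eos>, conditional append) with a three-stage pipeline: map all indices to words, truncate at the first <eos> via index/slice, then filter <pad>/<bos> with a comprehension.
import Mathlib
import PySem

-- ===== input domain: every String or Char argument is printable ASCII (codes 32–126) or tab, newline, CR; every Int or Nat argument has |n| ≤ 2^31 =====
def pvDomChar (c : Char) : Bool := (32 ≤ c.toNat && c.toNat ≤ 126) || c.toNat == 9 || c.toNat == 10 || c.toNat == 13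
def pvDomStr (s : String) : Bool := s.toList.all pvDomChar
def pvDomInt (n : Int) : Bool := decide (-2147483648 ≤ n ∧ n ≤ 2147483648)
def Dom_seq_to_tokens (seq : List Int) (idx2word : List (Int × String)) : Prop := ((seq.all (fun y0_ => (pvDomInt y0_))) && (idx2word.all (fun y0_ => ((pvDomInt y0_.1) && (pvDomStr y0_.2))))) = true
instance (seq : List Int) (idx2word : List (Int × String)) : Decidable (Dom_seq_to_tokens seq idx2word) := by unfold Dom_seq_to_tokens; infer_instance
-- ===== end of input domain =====

-- B replaces A's single break+branch loop with a map / truncate-at-<eos> / filter pipeline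
-- (alternative decomposition, same O(n) cost).

-- ===== PORT A =====
-- A's loop with `break`, as structural recursion: stop on '<eos>', skip '<pad>'/'<bos>'.
def seq_to_tokens (seq : List Int) (idx2word : List (Int × String)) : List String :=
  match seq with
  | [] => []
  | i :: rest =>
    let w := (PySem.Dict.mk idx2word).getD i "<unk>"   -- idx2word.get(int(i), '<unk>'); int(i) is identity on int
    if w == "<eos>" then []                            -- break
    else if w == "<pad>" || w == "<bos>" then seq_to_tokens rest idx2word
    else w :: seq_to_tokens rest idx2word

-- ===== PORT B =====
def seq_to_tokens_alt (seq : List Int) (idx2word : List (Int × String)) : List String :=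
  let words := seq.map (fun i => (PySem.Dict.mk idx2word).getD i "<unk>")
  let words2 :=
    if words.contains "<eos>" then
      match PySem.List.index? words "<eos>" with       -- words.index('<eos>')
      | some k => words.take k                         -- words[:k], k = a nonneg found index
      | none => words                                  -- unreachable: '<eos>' in words
    else words
  words2.filter (fun w => !(w == "<pad>" || w == "<bos>"))

-- ===== PRECONDITION & SPEC =====
def Spec_seq_to_tokens (seq : List Int) (idx2word : List (Int × String)) (out : List String) : Prop := out = seq_to_tokens_alt seq idx2word
instance (seq : List Int) (idx2word : List (Int × String)) (out : List String) : Decidable (Spec_seq_to_tokens seq idx2word out) := by unfold Spec_seq_to_tokens; infer_instance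

-- ===== CLAIM (what is proved, stated in full; the proofs are below) =====
def Claim_equal_seq_to_tokens : Prop := ∀ (seq : List Int) (idx2word : List (Int × String)), Dom_seq_to_tokens seq idx2word → Spec_seq_to_tokens seq idx2word (seq_to_tokens seq idx2word)

-- ===== LEMMAS AND PROOFS =====

-- B's truncation stage (contains / index? / take) equals takeWhile (· ≠ "<eos>").
theorem trunc_eq_takeWhile (ws : List String) :
    (if ws.contains "<eos>" then
      match PySem.List.index? ws "<eos>" with
      | some k => ws.take k
      | none => ws
     else ws) = ws.takeWhile (fun w => !(w == "<eos>")) := by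
  simp only [PySem.List.index?_eq_idxOf?]
  induction ws with
  | nil => simp
  | cons w rest ih =>
    by_cases hw : w = "<eos>"
    · subst hw
      simp [List.idxOf?_cons]
    · rw [List.idxOf?_cons]
      by_cases hm : "<eos>" ∈ rest
      · obtain ⟨k, hk⟩ := Option.isSome_iff_exists.mp
          (show (List.idxOf? "<eos>" rest).isSome by rw [List.isSome_idxOf?]; exact hm)
        rw [hk]
        simp [hw, Ne.symm hw, hm, List.take_succ_cons]
        simpa [hm, hk] using ih
      · have hn : List.idxOf? "<eos>" rest = none := by
          simpa [List.idxOf?_eq_none_iff] using hm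
        simp [hw, Ne.symm hw, hm]
        simpa [hm] using ih

theorem seq_to_tokens_eq (seq : List Int) (idx2word : List (Int × String)) :
    seq_to_tokens seq idx2word = seq_to_tokens_alt seq idx2word := by
  unfold seq_to_tokens_alt
  simp only [trunc_eq_takeWhile]
  induction seq with
  | nil => simp [seq_to_tokens]
  | cons i rest ih =>
    simp only [List.map_cons, List.takeWhile_cons]
    by_cases he : (PySem.Dict.mk idx2word).getD i "<unk>" = "<eos>"
    · simp [seq_to_tokens, he]
    · by_cases hp : (PySem.Dict.mk idx2word).getD i "<unk>" = "<pad>"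
        <;> by_cases hb : (PySem.Dict.mk idx2word).getD i "<unk>" = "<bos>"
        <;> simp [seq_to_tokens, he, hp, hb, ih]

-- ===== VERDICT (by name: the statement is the Claim_ definition above) =====
theorem seq_to_tokens_spec : Claim_equal_seq_to_tokens := by
  intro seq idx2word _
  unfold Spec_seq_to_tokens
  exact seq_to_tokens_eq seq idx2word
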